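-- pv_equiv track=rewrite | github.com/Aryudesu/ABC | ABC/100_199/174/C.py | calc
-- ===== SOURCE A (Python) =====
-- def calc(K):
--     num = 0
--     data = set()
--     count = 0
--     while True:
--         count += 1
--         num = (num * 10 + 7) % K
--         if num in data:
--             return -1
--         data.add(num)
--         if num == 0:
--             return count
-- ===== SOURCE B (Python) =====
-- def calc(K):
--     k = abs(K)
--     if k % 2 == 0 or k % 5 == 0:
--         return -1
--     num = 0
--     for count in range(1, k + 1):
--         num = (num * 10 + 7) % K
--         if num == 0:
--             return count
--     return -1
-- ===== Notes on version B (the rewrite author's own statement) =====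
-- stated objective: alternative
-- what changed: Replaces A's while-True loop with a seen-residue set for cycle detection by a number-theoretic guard (7...7 is odd and ≡ 2 mod 5, so the answer is -1 whenever 2 or 5 divides K) followed by a bounded for-loop over range(1, abs(K)+1) keeping only num and count: in the remaining coprime case x -> 10x+7 is a permutation mod K, so the first zero arrives within |K| steps and no repeat can precede it; the set and its membership test disappear.
-- crash fix: A raises ZeroDivisionError on K = 0 (the modulus of '%'); B returns -1 there. — e.g. on calc(0): A raises ZeroDivisionError, B returns -1
import Mathlib
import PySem

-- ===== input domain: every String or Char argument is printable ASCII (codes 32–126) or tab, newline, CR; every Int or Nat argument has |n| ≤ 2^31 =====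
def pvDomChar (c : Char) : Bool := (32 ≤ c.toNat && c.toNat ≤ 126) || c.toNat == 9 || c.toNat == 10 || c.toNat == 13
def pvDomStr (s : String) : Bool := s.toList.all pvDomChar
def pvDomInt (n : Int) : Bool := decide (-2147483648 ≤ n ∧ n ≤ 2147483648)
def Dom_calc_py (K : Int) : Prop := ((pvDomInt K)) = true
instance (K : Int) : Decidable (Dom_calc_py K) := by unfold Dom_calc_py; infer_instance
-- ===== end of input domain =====

-- B drops A's seen-residue set and `while True`: after ruling out 2 ∣ K and 5 ∣ K (where 7...7 is never
-- divisible), a bounded loop of |K| steps keeping only num and count suffices (pigeonhole), in O(1) space.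

-- ===== PORT A =====
-- A's `while True` is made total with fuel |K| + 1, enough by pigeonhole; the fuel-0 value -1
-- agrees with what a repeated residue returns, and the proofs below show the result is A's.
def calcA_loop (K : Int) : Nat → Int → PySem.Set Int → Int → Int
  | 0, _, _, _ => -1
  | fuel+1, num, data, count =>
      let count' := count + 1
      let num' := PySem.Int.mod (num * 10 + 7) K
      if PySem.Set.contains data num' then -1
      else
        let data' := PySem.Set.add data num'
        if num' = 0 then count' else calcA_loop K fuel num' data' count'

def calc_py (K : Int) : Int := calcA_loop K (K.natAbs + 1) 0 PySem.Set.empty 0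

-- ===== PORT B =====
def calcB_loop (K : Int) : Nat → Int → Int → Int
  | 0, _, _ => -1
  | rem+1, num, count =>
      let num' := PySem.Int.mod (num * 10 + 7) K
      if num' = 0 then count else calcB_loop K rem num' (count + 1)

def calc_py_alt (K : Int) : Int :=
  let k : Int := |K|
  if PySem.Int.mod k 2 = 0 ∨ PySem.Int.mod k 5 = 0 then -1
  else calcB_loop K k.toNat 0 1

-- ===== PRECONDITION & SPEC =====
-- Pre_ excludes only K = 0, where A raises ZeroDivisionError on `% K`.
def Pre_calc_py (K : Int) : Prop := K ≠ 0
instance (K : Int) : Decidable (Pre_calc_py K) := by unfold Pre_calc_py; infer_instance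
def pvWitness_calc_py : Int := 7

-- A raises ZeroDivisionError on K = 0 (the modulus); B returns -1 there.
def Raises_calc_py (K : Int) : Prop := K = 0
instance (K : Int) : Decidable (Raises_calc_py K) := by unfold Raises_calc_py; infer_instance
def pvRaiseWitness_calc_py : Int := 0
def pvRaiseWitnessOut_calc_py : Int := -1

def Spec_calc_py (K : Int) (out : Int) : Prop := out = calc_py_alt K
instance (K : Int) (out : Int) : Decidable (Spec_calc_py K out) := by unfold Spec_calc_py; infer_instance

-- ===== CLAIM (what is proved, stated in full; the proofs are below) =====
def Claim_equal_calc_py : Prop := ∀ (K : Int), Dom_calc_py K → Pre_calc_py K → Spec_calc_py K (calc_py K)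
def Claim_raises_calc_py : Prop := (∀ (K : Int), Dom_calc_py K → Raises_calc_py K → ¬ Pre_calc_py K) ∧ (Dom_calc_py (pvRaiseWitness_calc_py) ∧ Raises_calc_py (pvRaiseWitness_calc_py) ∧ calc_py_alt (pvRaiseWitness_calc_py) = pvRaiseWitnessOut_calc_py)

-- ===== LEMMAS AND PROOFS =====

-- the residue sequence both loops traverse: iterSeq K n = num after n iterations
def iterSeq (K : Int) : Nat → Int
  | 0 => 0
  | n+1 => PySem.Int.mod (iterSeq K n * 10 + 7) K

lemma iter_bdd_pos (K : Int) (hK : 0 < K) (n : Nat) :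
    0 ≤ iterSeq K (n+1) ∧ iterSeq K (n+1) < K :=
  ⟨PySem.Int.mod_nonneg _ hK, PySem.Int.mod_lt _ hK⟩

lemma iter_bdd_neg (K : Int) (hK : K < 0) (n : Nat) :
    K < iterSeq K (n+1) ∧ iterSeq K (n+1) ≤ 0 :=
  PySem.Int.mod_neg_bounds _ hK

lemma iter_periodic (K : Int) (u t : Nat) (h : iterSeq K t = iterSeq K u) :
    ∀ k, iterSeq K (t+k) = iterSeq K (u+k) := by
  intro k
  induction k with
  | zero => simpa using h
  | succ k ih =>
      show iterSeq K (t+k+1) = iterSeq K (u+k+1)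
      simp only [iterSeq, ih]

-- a repeat before any zero means the sequence never hits zero
lemma iter_never_zero (K : Int) (u t : Nat) (hu : 1 ≤ u) (hut : u < t)
    (hrep : iterSeq K t = iterSeq K u)
    (hnz : ∀ m, 1 ≤ m → m < t → iterSeq K m ≠ 0) :
    ∀ m, 1 ≤ m → iterSeq K m ≠ 0 := by
  intro m
  induction m using Nat.strong_induction_on with
  | _ m ih =>
      intro hm
      by_cases hlt : m < t
      · exact hnz m hm hlt
      · have hmt : t ≤ m := by omega
        have : iterSeq K m = iterSeq K (u + (m - t)) := by
          have := iter_periodic K u t hrep (m - t)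
          rwa [Nat.add_sub_cancel' hmt] at this
        rw [this]
        exact ih (u + (m - t)) (by omega) (by omega)

-- B's loop returns -1 whenever the sequence never hits zero
lemma calcB_loop_neg_one (K : Int) (hall : ∀ m, 1 ≤ m → iterSeq K m ≠ 0) :
    ∀ rem (i : Nat) (c : Int), calcB_loop K rem (iterSeq K i) c = -1 := by
  intro rem
  induction rem with
  | zero => intro i c; rfl
  | succ rem ih =>
      intro i c
      show (if iterSeq K (i+1) = 0 then c else calcB_loop K rem (iterSeq K (i+1)) (c+1)) = -1
      rw [if_neg (hall (i+1) (by omega))]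
      exact ih (i+1) (c+1)

lemma length_le_of_nodup_subset_Ioo (l : List Int) (a b : Int) (hnd : l.Nodup)
    (h : ∀ x ∈ l, a < x ∧ x < b) : l.length ≤ (b - a - 1).toNat := by
  have hsub : l.toFinset ⊆ Finset.Ioo a b := by
    intro x hx
    rw [List.mem_toFinset] at hx
    rw [Finset.mem_Ioo]
    exact h x hx
  have := Finset.card_le_card hsub
  rwa [List.toFinset_card_of_nodup hnd, Int.card_Ioo] at this

-- the distinct nonzero residues in `data` are at most |K| - 1 many
lemma data_card_bound (K : Int) (hK : K ≠ 0) (i : Nat) (data : List Int)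
    (hnd : data.Nodup)
    (hmem : ∀ x, x ∈ data ↔ ∃ m, 1 ≤ m ∧ m ≤ i ∧ iterSeq K m = x)
    (hlen : data.length = i)
    (hnz : ∀ m, 1 ≤ m → m ≤ i → iterSeq K m ≠ 0) :
    i ≤ K.natAbs - 1 := by
  rcases lt_or_gt_of_ne hK with hneg | hpos
  · have h := length_le_of_nodup_subset_Ioo data K 0 hnd (by
      intro x hx
      obtain ⟨m, hm1, hm2, rfl⟩ := (hmem x).1 hx
      obtain ⟨m', rfl⟩ : ∃ m', m = m' + 1 := ⟨m - 1, by omega⟩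
      have := iter_bdd_neg K hneg m'
      have := hnz (m'+1) (by omega) hm2
      constructor <;> omega)
    omega
  · have h := length_le_of_nodup_subset_Ioo data 0 K hnd (by
      intro x hx
      obtain ⟨m, hm1, hm2, rfl⟩ := (hmem x).1 hx
      obtain ⟨m', rfl⟩ : ∃ m', m = m' + 1 := ⟨m - 1, by omega⟩
      have := iter_bdd_pos K hpos m'
      have := hnz (m'+1) (by omega) hm2
      constructor <;> omega)
    omega

-- when 2 or 5 divides K, num = (10*x + 7) % K is never 0 (7...7 is odd and ≡ 2 mod 5)
lemma iter_ne_zero_of_dvd (K : Int) (h : (2 : Int) ∣ K ∨ (5 : Int) ∣ K) :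
    ∀ m, 1 ≤ m → iterSeq K m ≠ 0 := by
  rintro m hm
  obtain ⟨n, rfl⟩ : ∃ n, m = n + 1 := ⟨m - 1, by omega⟩
  show PySem.Int.mod (iterSeq K n * 10 + 7) K ≠ 0
  have hd := PySem.Int.floordiv_mul_add_mod (iterSeq K n * 10 + 7) K
  rcases h with h2 | h5
  · obtain ⟨s, hs⟩ := Dvd.dvd.mul_left h2 (PySem.Int.floordiv (iterSeq K n * 10 + 7) K)
    omega
  · obtain ⟨s, hs⟩ := Dvd.dvd.mul_left h5 (PySem.Int.floordiv (iterSeq K n * 10 + 7) K)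
    omega

-- A's loop returns -1 whenever the sequence never hits zero (by repeat or by fuel)
lemma calcA_loop_neg_one (K : Int) (hall : ∀ m, 1 ≤ m → iterSeq K m ≠ 0) :
    ∀ fuel (i : Nat) (data : PySem.Set Int) (c : Int),
      calcA_loop K fuel (iterSeq K i) data c = -1 := by
  intro fuel
  induction fuel with
  | zero => intro i data c; rfl
  | succ f ih =>
      intro i data c
      show (if PySem.Set.contains data (iterSeq K (i+1)) then (-1 : Int)
            else if iterSeq K (i+1) = 0 then c + 1
            else calcA_loop K f (iterSeq K (i+1)) (PySem.Set.add data (iterSeq K (i+1))) (c + 1)) = -1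
      by_cases hc : PySem.Set.contains data (iterSeq K (i+1)) = true
      · rw [if_pos hc]
      · rw [if_neg hc, if_neg (hall (i+1) (by omega))]
        exact ih (i+1) _ _

-- main loop correspondence
lemma main_loop (K : Int) (hK : K ≠ 0) :
    ∀ fuel (i : Nat) (data : PySem.Set Int),
      i + fuel = K.natAbs + 1 →
      data.Nodup →
      (∀ x, x ∈ data ↔ ∃ m, 1 ≤ m ∧ m ≤ i ∧ iterSeq K m = x) →
      data.length = i →
      (∀ m, 1 ≤ m → m ≤ i → iterSeq K m ≠ 0) →
      calcA_loop K fuel (iterSeq K i) data (i : Int) =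
        calcB_loop K (K.natAbs - i) (iterSeq K i) ((i : Int) + 1) := by
  intro fuel
  induction fuel with
  | zero =>
      intro i data hfuel hnd hmem hlen hnz
      have := data_card_bound K hK i data hnd hmem hlen hnz
      have : K.natAbs ≠ 0 := by simpa using hK
      omega
  | succ f ih =>
      intro i data hfuel hnd hmem hlen hnz
      have hbound := data_card_bound K hK i data hnd hmem hlen hnz
      have hKa : K.natAbs ≠ 0 := by simpa using hK
      have hrem : K.natAbs - i = (K.natAbs - i - 1) + 1 := by omega
      rw [hrem]
      show (if PySem.Set.contains data (iterSeq K (i+1)) then (-1 : Int)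
            else if iterSeq K (i+1) = 0 then (i : Int) + 1
            else calcA_loop K f (iterSeq K (i+1)) (PySem.Set.add data (iterSeq K (i+1))) ((i : Int) + 1)) =
           (if iterSeq K (i+1) = 0 then (i : Int) + 1
            else calcB_loop K (K.natAbs - i - 1) (iterSeq K (i+1)) ((i : Int) + 1 + 1))
      by_cases hc : PySem.Set.contains data (iterSeq K (i+1)) = true
      · -- a repeated residue: A returns -1; B never hits zero and returns -1
        rw [if_pos hc]
        obtain ⟨m, hm1, hm2, hrep⟩ := (hmem _).1 ((PySem.Set.contains_iff _ _).1 hc)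
        have hall := iter_never_zero K m (i+1) hm1 (by omega) hrep.symm
          (fun m' h1 h2 => hnz m' h1 (by omega))
        rw [if_neg (hall (i+1) (by omega)), calcB_loop_neg_one K hall]
      · have hnotmem : iterSeq K (i+1) ∉ data := fun h =>
          hc ((PySem.Set.contains_iff _ _).2 h)
        rw [if_neg hc]
        by_cases hz : iterSeq K (i+1) = 0
        · rw [if_pos hz, if_pos hz]
        · rw [if_neg hz, if_neg hz]
          have h1 : ((i : Int) + 1) = ((i + 1 : Nat) : Int) := by push_cast; ring
          have h2 : K.natAbs - i - 1 = K.natAbs - (i + 1) := by omega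
          rw [h1, h2]
          refine ih (i+1) (PySem.Set.add data (iterSeq K (i+1))) (by omega)
            (PySem.Set.nodup_add _ _ hnd) ?_ ?_ ?_
          · intro x
            rw [PySem.Set.mem_add, hmem]
            constructor
            · rintro (⟨m, hm1, hm2, rfl⟩ | rfl)
              · exact ⟨m, hm1, by omega, rfl⟩
              · exact ⟨i+1, by omega, by omega, rfl⟩
            · rintro ⟨m, hm1, hm2, rfl⟩
              by_cases hmi : m ≤ i
              · exact Or.inl ⟨m, hm1, hmi, rfl⟩
              · have : m = i + 1 := by omega
                subst this; exact Or.inr rfl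
          · rw [PySem.Set.add_of_not_mem hnotmem, List.length_append, hlen]; simp
          · intro m h1' h2'
            by_cases hmi : m ≤ i
            · exact hnz m h1' hmi
            · have : m = i + 1 := by omega
              subst this; exact hz

-- ===== VERDICT (by name: the statement is the Claim_ definition above) =====
theorem calc_py_spec : Claim_equal_calc_py := by
  intro K _ hK
  show calc_py K = calc_py_alt K
  unfold calc_py calc_py_alt
  by_cases hg : PySem.Int.mod |K| 2 = 0 ∨ PySem.Int.mod |K| 5 = 0
  · rw [if_pos hg]
    have hdvd : (2 : Int) ∣ K ∨ (5 : Int) ∣ K := by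
      rcases hg with h | h
      · exact Or.inl ((dvd_abs 2 K).1 ((PySem.Int.mod_eq_zero_iff_dvd _ _).1 h))
      · exact Or.inr ((dvd_abs 5 K).1 ((PySem.Int.mod_eq_zero_iff_dvd _ _).1 h))
    exact calcA_loop_neg_one K (iter_ne_zero_of_dvd K hdvd) (K.natAbs + 1) 0 PySem.Set.empty 0
  · rw [if_neg hg]
    have h := main_loop K hK (K.natAbs + 1) 0 PySem.Set.empty (by omega)
      List.nodup_nil
      (by intro x; simp [PySem.Set.empty])
      rfl
      (by intro m h1 h2; omega)
    have habs : |K|.toNat = K.natAbs := by rw [Int.abs_eq_natAbs]; omega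
    rw [habs]
    simpa [iterSeq] using h

def calc_py_raises : Claim_raises_calc_py := by
  unfold Claim_raises_calc_py
  exact ⟨fun K _ h hp => hp h, by decide⟩
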